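-- pv_equiv track=rewrite | github.com/kangwonlee/nmisp | symbol_converter.py | wrap_symbol_name
-- ===== SOURCE A (Python) =====
-- def wrap_symbol_name(symbol_name):
--     """
--     Wrap '_' separated symbol name parts with '{}'
--     :param str symbol_name:
--     :return:
--
--     Example
--     >>> cp = SymbolConverter()
--     >>> cp.wrap_symbol_name('L_AB_m')
--     'L_{AB}_{m}'
--     """
--     symbol_name_split_under_line = symbol_name.split('_')
--     if 1 < len(symbol_name_split_under_line):
--         symbol_name_underline_wrapped = [symbol_name_split_under_line[0]]
--         for part in symbol_name_split_under_line[1:]: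
--             symbol_name_underline_wrapped.append('{%s}' % part)
--
--         symbol_name = '_'.join(symbol_name_underline_wrapped)
--
--     return symbol_name
-- ===== SOURCE B (Python) =====
-- def wrap_symbol_name(symbol_name):
--     out = []
--     seen = False
--     for ch in symbol_name:
--         if ch == '_':
--             out.append('}_{' if seen else '_{')
--             seen = True
--         else:
--             out.append(ch)
--     if seen:
--         out.append('}')
--     return ''.join(out)
-- ===== Notes on version B (the rewrite author's own statement) =====
-- stated objective: alternative
-- what changed: Replaces split-on-underscore / wrap-each-part / join with a single left-to-right character scan that emits brace openers and closers in place, never building the list of parts.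
import Mathlib
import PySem

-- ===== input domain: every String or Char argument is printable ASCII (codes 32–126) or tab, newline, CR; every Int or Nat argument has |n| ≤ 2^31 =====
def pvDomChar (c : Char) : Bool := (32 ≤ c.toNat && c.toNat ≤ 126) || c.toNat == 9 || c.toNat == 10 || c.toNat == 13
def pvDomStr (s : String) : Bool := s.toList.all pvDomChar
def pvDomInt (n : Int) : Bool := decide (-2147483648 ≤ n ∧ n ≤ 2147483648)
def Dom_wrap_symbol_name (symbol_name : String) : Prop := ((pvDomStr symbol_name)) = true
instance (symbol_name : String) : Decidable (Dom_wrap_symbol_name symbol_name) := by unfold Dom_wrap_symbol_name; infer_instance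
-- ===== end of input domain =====

-- B replaces the split / wrap-each-part / join pipeline with a single character scan
-- that emits braces in place (alternative decomposition, same cost).

-- ===== PORT A =====
-- symbol_name.split('_'); if more than one part, keep part 0 and append '{%s}' % part
-- for the rest (ported as the foldl accumulating the wrapped list), then '_'.join.
def wrap_symbol_name (symbol_name : String) : String :=
  let parts : List (List Char) := PySem.Chars.splitOn symbol_name.toList ['_']
  if 1 < parts.length then
    let wrapped : List (List Char) :=
      (parts.drop 1).foldl (fun acc part => acc ++ ['{' :: part ++ ['}']]) [parts.headI]
    String.ofList (PySem.Chars.join ['_'] wrapped)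
  else
    symbol_name

-- ===== PORT B =====
-- single pass: copy ordinary chars; at each '_' emit "_{" (or "}_{" if a brace is open);
-- close the last brace at the end.
def wrap_symbol_name_alt (symbol_name : String) : String :=
  let st := symbol_name.toList.foldl
    (fun (st : List Char × Bool) c =>
      if c = '_' then
        (st.1 ++ (if st.2 then ['}', '_', '{'] else ['_', '{']), true)
      else (st.1 ++ [c], st.2))
    ([], false)
  String.ofList (if st.2 then st.1 ++ ['}'] else st.1)

-- ===== PRECONDITION & SPEC =====
def Spec_wrap_symbol_name (symbol_name : String) (out : String) : Prop := out = wrap_symbol_name_alt symbol_name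
instance (symbol_name : String) (out : String) : Decidable (Spec_wrap_symbol_name symbol_name out) := by unfold Spec_wrap_symbol_name; infer_instance

-- ===== CLAIM (what is proved, stated in full; the proofs are below) =====
def Claim_equal_wrap_symbol_name : Prop := ∀ (symbol_name : String), Dom_wrap_symbol_name symbol_name → Spec_wrap_symbol_name symbol_name (wrap_symbol_name symbol_name)

-- ===== LEMMAS AND PROOFS =====

-- clean recursive splitter on '_' (proof-side model of PySem.Chars.splitOn · ['_'])
def splitU : List Char → List (List Char)
  | [] => [[]]
  | c :: rest =>
    if c = '_' then [] :: splitU rest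
    else
      match splitU rest with
      | [] => [[c]]
      | p :: ps => (c :: p) :: ps

theorem splitU_ne_nil (cs : List Char) : splitU cs ≠ [] := by
  cases cs with
  | nil => simp [splitU]
  | cons c rest =>
    simp only [splitU]
    split_ifs
    · simp
    · cases h : splitU rest <;> simp

-- the fuel loop of splitOn, characterised against splitU
def consFst (pre : List Char) : List (List Char) → List (List Char)
  | [] => [pre]
  | p :: ps => (pre ++ p) :: ps

theorem go_eq_splitU (fuel : Nat) : ∀ (l cur : List Char) (acc : List (List Char)),
    l.length ≤ fuel →
    PySem.Chars.splitOn.go ['_'] fuel l cur acc = acc.reverse ++ consFst cur.reverse (splitU l) := by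
  induction fuel with
  | zero =>
    intro l cur acc h
    have : l = [] := by cases l <;> simp_all
    subst this
    rw [PySem.Chars.splitOn.go.eq_def]
    simp [splitU, consFst]
  | succ fuel ih =>
    intro l cur acc h
    cases l with
    | nil =>
      rw [PySem.Chars.splitOn.go.eq_def]
      simp [splitU, consFst]
    | cons c rest =>
      rw [PySem.Chars.splitOn.go.eq_def]
      simp only []
      by_cases hc : c = '_'
      · subst hc
        have hp : List.isPrefixOf ['_'] ('_' :: rest) = true := by simp [List.isPrefixOf]
        rw [if_pos hp]
        simp only [List.length_cons] at h
        rw [ih _ _ _ (by simp; omega)]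
        simp only [splitU, List.reverse_cons]
        cases hs : splitU rest with
        | nil => exact absurd hs (splitU_ne_nil rest)
        | cons p ps => simp [consFst]; rw [hs]
      · have hp : List.isPrefixOf ['_'] (c :: rest) = false := by
          simp [List.isPrefixOf]; exact fun h' => hc h'.symm
        rw [if_neg (by simp [hp])]
        simp only [List.length_cons] at h
        rw [ih _ _ _ (by omega)]
        simp only [splitU, if_neg hc, List.reverse_cons]
        cases hs : splitU rest with
        | nil => exact absurd hs (splitU_ne_nil rest)
        | cons p ps => simp [consFst]

theorem splitOn_eq_splitU (cs : List Char) :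
    PySem.Chars.splitOn cs ['_'] = splitU cs := by
  unfold PySem.Chars.splitOn
  rw [go_eq_splitU _ _ _ _ (by omega)]
  cases hs : splitU cs with
  | nil => exact absurd hs (splitU_ne_nil cs)
  | cons p ps => simp [consFst]

-- the A-side foldl builds head :: map wrap tail
theorem foldl_wrap (l : List (List Char)) : ∀ (init : List (List Char)),
    l.foldl (fun acc part => acc ++ ['{' :: part ++ ['}']]) init
      = init ++ l.map (fun part => '{' :: part ++ ['}']) := by
  induction l with
  | nil => simp
  | cons p ps ih => intro init; rw [List.foldl_cons, ih]; simp

-- recursive forms of the two joins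
def interB : List (List Char) → List Char
  | [] => []
  | [p] => p
  | p :: q :: ps => p ++ '}' :: '_' :: '{' :: interB (q :: ps)

def interA : List (List Char) → List Char
  | [] => []
  | [p] => '{' :: p ++ ['}']
  | p :: q :: ps => ('{' :: p ++ ['}']) ++ '_' :: interA (q :: ps)

theorem interA_eq (p : List Char) (ps : List (List Char)) :
    interA (p :: ps) = '{' :: interB (p :: ps) ++ ['}'] := by
  induction ps generalizing p with
  | nil => simp [interA, interB]
  | cons q qs ih => simp [interA, interB, ih q]

theorem interB_cons_cons (c : Char) (p : List Char) (ps : List (List Char)) :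
    interB ((c :: p) :: ps) = c :: interB (p :: ps) := by
  cases ps <;> simp [interB]

theorem join_eq_interA (p0 : List Char) (p : List Char) (ps : List (List Char)) :
    PySem.Chars.join ['_'] (p0 :: (p :: ps).map (fun part => '{' :: part ++ ['}']))
      = p0 ++ '_' :: interA (p :: ps) := by
  induction ps generalizing p0 p with
  | nil =>
    rw [List.map_cons, List.map_nil, PySem.Chars.join_cons_cons]
    simp [PySem.Chars.join, List.intercalate, interA]
  | cons q qs ih =>
    rw [List.map_cons, PySem.Chars.join_cons_cons, ih]
    simp [interA]

-- B's loop, split into output and flag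
def emitB : List Char → Bool → List Char
  | [], _ => []
  | c :: rest, seen =>
    if c = '_' then (if seen then ['}', '_', '{'] else ['_', '{']) ++ emitB rest true
    else c :: emitB rest seen

def flagB : List Char → Bool → Bool
  | [], seen => seen
  | c :: rest, seen => if c = '_' then flagB rest true else flagB rest seen

theorem foldl_eq_emit (cs : List Char) : ∀ (out : List Char) (seen : Bool),
    cs.foldl
      (fun (st : List Char × Bool) c =>
        if c = '_' then
          (st.1 ++ (if st.2 then ['}', '_', '{'] else ['_', '{']), true)
        else (st.1 ++ [c], st.2))
      (out, seen) = (out ++ emitB cs seen, flagB cs seen) := by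
  induction cs with
  | nil => intro out seen; simp [emitB, flagB]
  | cons c rest ih =>
    intro out seen
    by_cases hc : c = '_' <;> simp [List.foldl_cons, hc, emitB, flagB, ih]

theorem flagB_true (cs : List Char) : flagB cs true = true := by
  induction cs with
  | nil => rfl
  | cons c rest ih => by_cases hc : c = '_' <;> simp [flagB, hc, ih]

theorem emitB_true (cs : List Char) : emitB cs true = interB (splitU cs) := by
  induction cs with
  | nil => simp [emitB, splitU, interB]
  | cons c rest ih =>
    by_cases hc : c = '_'
    · subst hc
      simp only [emitB, ih, splitU]
      cases hs : splitU rest with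
      | nil => exact absurd hs (splitU_ne_nil rest)
      | cons p ps => simp [interB]
    · simp only [emitB, if_neg hc, ih, splitU]
      cases hs : splitU rest with
      | nil => exact absurd hs (splitU_ne_nil rest)
      | cons p ps => exact (interB_cons_cons c p ps).symm

-- main characterisation of B's scan output against A's split
theorem emitB_false (cs : List Char) :
    emitB cs false ++ (if flagB cs false then ['}'] else [])
      = match splitU cs with
        | [] => []
        | [p] => p
        | p :: q :: ps => p ++ '_' :: interA (q :: ps) := by
  induction cs with
  | nil => simp [emitB, flagB, splitU]
  | cons c rest ih =>
    by_cases hc : c = '_'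
    · subst hc
      simp only [emitB, flagB, flagB_true, emitB_true, splitU]
      cases hs : splitU rest with
      | nil => exact absurd hs (splitU_ne_nil rest)
      | cons p ps => simp [interA_eq]
    · simp only [emitB, flagB, if_neg hc, splitU]
      cases hs : splitU rest with
      | nil => exact absurd hs (splitU_ne_nil rest)
      | cons p ps =>
        rw [hs] at ih
        cases ps with
        | nil => simpa using congrArg (c :: ·) ih
        | cons q qs => simpa using congrArg (c :: ·) ih

-- only one part means no '_' : the single part is the whole string
theorem splitU_singleton (cs p : List Char) (h : splitU cs = [p]) : cs = p := by
  induction cs generalizing p with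
  | nil => simp [splitU] at h; simp [h]
  | cons c rest ih =>
    by_cases hc : c = '_'
    · subst hc
      simp only [splitU] at h
      injection h with h1 h2
      exact absurd h2 (splitU_ne_nil rest)
    · simp only [splitU, if_neg hc] at h
      cases hs : splitU rest with
      | nil => exact absurd hs (splitU_ne_nil rest)
      | cons q qs =>
        rw [hs] at h
        cases qs with
        | nil =>
          injection h with h1 h2
          rw [← h1, ih q hs]
        | cons r rs => simp at h

-- a single part also means the scan never saw '_'
theorem flagB_of_single (cs : List Char) : ∀ (p : List Char), splitU cs = [p] → flagB cs false = false := by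
  induction cs with
  | nil => intro p _; rfl
  | cons c rest ih =>
    intro p h
    by_cases hc : c = '_'
    · subst hc
      simp only [splitU] at h
      injection h with h1 h2
      exact absurd h2 (splitU_ne_nil rest)
    · simp only [flagB, if_neg hc]
      simp only [splitU, if_neg hc] at h
      cases hs : splitU rest with
      | nil => exact absurd hs (splitU_ne_nil rest)
      | cons q qs =>
        rw [hs] at h
        cases qs with
        | nil => exact ih q hs
        | cons r rs => simp at h

-- ===== VERDICT (by name: the statement is the Claim_ definition above) =====
theorem wrap_symbol_name_spec : Claim_equal_wrap_symbol_name := by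
  intro s _
  unfold Spec_wrap_symbol_name wrap_symbol_name wrap_symbol_name_alt
  rw [foldl_eq_emit, splitOn_eq_splitU]
  simp only []
  have hmain := emitB_false s.toList
  cases hs : splitU s.toList with
  | nil => exact absurd hs (splitU_ne_nil _)
  | cons p ps =>
    rw [hs] at hmain
    cases ps with
    | nil =>
      rw [if_neg (by simp)]
      have hflag : flagB s.toList false = false := flagB_of_single s.toList p hs
      rw [hflag] at hmain
      simp only [Bool.false_eq_true, if_false, List.append_nil] at hmain
      rw [hflag]
      simp only [Bool.false_eq_true, if_false, List.nil_append]
      rw [hmain, ← splitU_singleton s.toList p hs, String.ofList_toList]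
    | cons q qs =>
      rw [if_pos (by simp)]
      have hB : (if flagB s.toList false = true then [] ++ emitB s.toList false ++ ['}']
                   else [] ++ emitB s.toList false)
          = emitB s.toList false ++ (if flagB s.toList false = true then ['}'] else []) := by
        split_ifs <;> simp
      rw [hB, hmain]
      rw [List.drop_one, List.tail_cons, foldl_wrap]
      simp only [List.headI, List.singleton_append]
      rw [join_eq_interA]
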